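-- pv_equiv track=rewrite | github.com/Negation-in-negative-reviews/sentiment-analysis-bert-finetuning | code/vader_negation_util.py | negated
-- ===== SOURCE A (Python) =====
-- NEGATE = \
--     ["aint", "arent", "cannot", "cant", "couldnt", "darent", "didnt", "doesnt",
--      "ain't", "aren't", "can't", "couldn't", "daren't", "didn't", "doesn't",
--      "dont", "hadnt", "hasnt", "havent", "isnt", "mightnt", "mustnt", "neither",
--      "don't", "hadn't", "hasn't", "haven't", "isn't", "mightn't", "mustn't",
--      "neednt", "needn't", "never", "none", "nope", "nor", "not", "nothing", "nowhere",
--      "oughtnt", "shant", "shouldnt", "uhuh", "wasnt", "werent",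
--      "oughtn't", "shan't", "shouldn't", "uh-uh", "wasn't", "weren't",
--      "without", "wont", "wouldnt", "won't", "wouldn't", "rarely", "seldom", "despite"]
--
-- def negated(input_words, include_nt=True):
--     """
--     Determine if input contains negation words
--     """
--     input_words = [str(w).lower() for w in input_words]
--     neg_words = []
--     neg_words.extend(NEGATE)
--     count = 0
--     for word in neg_words:
--         if word in input_words:
--             # return True
--             count += 1
--     if include_nt:
--         for word in input_words:
--             if "n't" in word:
--                 # return True
--                 count += 1
--     '''if "least" in input_words:
--         i = input_words.index("least")
--         if i > 0 and input_words[i - 1] != "at":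
--             return True'''
--     return count
-- ===== SOURCE B (Python) =====
-- NEGATE = \
--     ["aint", "arent", "cannot", "cant", "couldnt", "darent", "didnt", "doesnt",
--      "ain't", "aren't", "can't", "couldn't", "daren't", "didn't", "doesn't",
--      "dont", "hadnt", "hasnt", "havent", "isnt", "mightnt", "mustnt", "neither",
--      "don't", "hadn't", "hasn't", "haven't", "isn't", "mightn't", "mustn't",
--      "neednt", "needn't", "never", "none", "nope", "nor", "not", "nothing", "nowhere",
--      "oughtnt", "shant", "shouldnt", "uhuh", "wasnt", "werent",
--      "oughtn't", "shan't", "shouldn't", "uh-uh", "wasn't", "weren't",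
--      "without", "wont", "wouldnt", "won't", "wouldn't", "rarely", "seldom", "despite"]
--
-- _NEGATE_SET = set(NEGATE)
--
-- def negated(input_words, include_nt=True):
--     """
--     Determine if input contains negation words
--     """
--     found = set()
--     nt = 0
--     for w in input_words:
--         w = str(w).lower()
--         if w in _NEGATE_SET:
--             found.add(w)
--         if include_nt and "n't" in w:
--             nt += 1
--     return len(found) + nt
-- ===== Notes on version B (the rewrite author's own statement) =====
-- stated objective: faster
-- what changed: B makes one pass over the input words (instead of scanning the input once per NEGATE word), collecting the distinct negation words found in a hash set and counting n't-words in the same loop; it returns len(found)+nt.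
import Mathlib
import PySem

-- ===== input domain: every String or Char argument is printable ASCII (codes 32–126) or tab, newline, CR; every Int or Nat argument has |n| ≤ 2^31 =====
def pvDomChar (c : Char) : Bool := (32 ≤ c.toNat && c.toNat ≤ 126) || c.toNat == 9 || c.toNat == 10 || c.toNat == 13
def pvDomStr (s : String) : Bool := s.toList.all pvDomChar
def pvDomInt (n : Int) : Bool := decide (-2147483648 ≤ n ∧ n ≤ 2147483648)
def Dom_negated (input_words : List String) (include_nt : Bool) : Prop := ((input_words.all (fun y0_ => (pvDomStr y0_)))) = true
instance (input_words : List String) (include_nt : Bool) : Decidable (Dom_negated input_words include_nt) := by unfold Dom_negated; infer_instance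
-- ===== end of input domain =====

-- B makes one pass over the input (instead of scanning the input once per NEGATE word), keeping a set of
-- negation words found and an n't counter in the same loop; faster by the measured constant mechanism.

def pvNEGATE : List String :=
  ["aint", "arent", "cannot", "cant", "couldnt", "darent", "didnt", "doesnt",
   "ain't", "aren't", "can't", "couldn't", "daren't", "didn't", "doesn't",
   "dont", "hadnt", "hasnt", "havent", "isnt", "mightnt", "mustnt", "neither",
   "don't", "hadn't", "hasn't", "haven't", "isn't", "mightn't", "mustn't",
   "neednt", "needn't", "never", "none", "nope", "nor", "not", "nothing", "nowhere",
   "oughtnt", "shant", "shouldnt", "uhuh", "wasnt", "werent",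
   "oughtn't", "shan't", "shouldn't", "uh-uh", "wasn't", "weren't",
   "without", "wont", "wouldnt", "won't", "wouldn't", "rarely", "seldom", "despite"]

-- ===== PORT A =====
def negated (input_words : List String) (include_nt : Bool) : Int :=
  let input_words := input_words.map PySem.Str.lower
  let neg_words := ([] : List String) ++ pvNEGATE
  let count : Int := neg_words.foldl (fun c word => if word ∈ input_words then c + 1 else c) 0
  if include_nt then
    input_words.foldl (fun c word => if PySem.Str.isIn "n't" word then c + 1 else c) count
  else count

-- ===== PORT B =====
def pvNegSet : PySem.Set String := PySem.Set.ofList pvNEGATE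

def negated_alt (input_words : List String) (include_nt : Bool) : Int :=
  let st := input_words.foldl
    (fun (st : PySem.Set String × Int) w =>
      let wl := PySem.Str.lower w
      let found := if PySem.Set.contains pvNegSet wl then PySem.Set.add st.1 wl else st.1
      let nt := if include_nt && PySem.Str.isIn "n't" wl then st.2 + 1 else st.2
      (found, nt))
    (PySem.Set.empty, 0)
  (PySem.Set.len st.1 : Int) + st.2

-- ===== PRECONDITION & SPEC =====
def Spec_negated (input_words : List String) (include_nt : Bool) (out : Int) : Prop := out = negated_alt input_words include_nt
instance (input_words : List String) (include_nt : Bool) (out : Int) : Decidable (Spec_negated input_words include_nt out) := by unfold Spec_negated; infer_instance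

-- ===== CLAIM (what is proved, stated in full; the proofs are below) =====
def Claim_equal_negated : Prop := ∀ (input_words : List String) (include_nt : Bool), Dom_negated input_words include_nt → Spec_negated input_words include_nt (negated input_words include_nt)

-- ===== LEMMAS AND PROOFS =====

-- counting fold = filter length
theorem pv_count_fold (p : String → Bool) (L : List String) (c : Int) :
    L.foldl (fun c w => if p w then c + 1 else c) c = c + (L.filter p).length := by
  induction L generalizing c with
  | nil => simp
  | cons x xs ih =>
    by_cases h : p x
    · simp [h, ih]
      omega
    · simp [h, ih]

-- conditional add = add over the filtered list
theorem pv_fold_filter {α β : Type} (p : α → Bool) (g : β → α → β) (L : List α) (s : β) :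
    L.foldl (fun s w => if p w then g s w else s) s = (L.filter p).foldl g s := by
  induction L generalizing s with
  | nil => rfl
  | cons x xs ih => by_cases h : p x <;> simp [h, ih]

-- lift the per-element lowering into a map
theorem pv_fold_lower {β : Type} (g : β → String → β) (L : List String) (s : β) :
    L.foldl (fun s w => g s (PySem.Str.lower w)) s = (L.map PySem.Str.lower).foldl g s :=
  by rw [List.foldl_map]

-- B's single fold, split into its two components
theorem pv_fold_split (L : List String) (inc : Bool) (s : PySem.Set String) (c : Int) :
    L.foldl (fun (st : PySem.Set String × Int) wl =>
        (if PySem.Set.contains pvNegSet wl then PySem.Set.add st.1 wl else st.1,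
         if inc && PySem.Str.isIn "n't" wl then st.2 + 1 else st.2)) (s, c)
    = (L.foldl (fun s wl => if PySem.Set.contains pvNegSet wl then PySem.Set.add s wl else s) s,
       L.foldl (fun c wl => if inc && PySem.Str.isIn "n't" wl then c + 1 else c) c) := by
  induction L generalizing s c with
  | nil => rfl
  | cons x xs ih => simp only [List.foldl_cons, ih]

theorem pv_negate_nodup : pvNEGATE.Nodup := by decide

-- cardinality bridge: distinct found words = NEGATE words present
theorem pv_card_eq (L : List String) :
    (PySem.Set.ofList (L.filter (fun w => PySem.Set.contains pvNegSet w))).length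
      = (pvNEGATE.filter (fun w => decide (w ∈ L))).length := by
  set M := L.filter (fun w => PySem.Set.contains pvNegSet w) with hM
  have h1 : (PySem.Set.ofList M).length = (PySem.Set.ofList M).toFinset.card :=
    (List.toFinset_card_of_nodup (PySem.Set.nodup_ofList M)).symm
  have h2 : (pvNEGATE.filter (fun w => decide (w ∈ L))).length
      = (pvNEGATE.filter (fun w => decide (w ∈ L))).toFinset.card :=
    (List.toFinset_card_of_nodup (pv_negate_nodup.filter _)).symm
  rw [h1, h2]
  congr 1
  ext x
  simp only [List.mem_toFinset, PySem.Set.mem_ofList, hM, List.mem_filter,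
    PySem.Set.contains_iff, PySem.Set.mem_ofList, pvNegSet, decide_eq_true_eq]
  tauto

-- ===== VERDICT (by name: the statement is the Claim_ definition above) =====
theorem negated_spec : Claim_equal_negated := by
  intro input_words include_nt _
  unfold Spec_negated negated negated_alt
  simp only [List.nil_append]
  rw [pv_fold_lower
        (fun (st : PySem.Set String × Int) wl =>
          (if PySem.Set.contains pvNegSet wl then PySem.Set.add st.1 wl else st.1,
           if include_nt && PySem.Str.isIn "n't" wl then st.2 + 1 else st.2)),
      pv_fold_split,
      pv_fold_filter (fun w => PySem.Set.contains pvNegSet w) PySem.Set.add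
        (input_words.map PySem.Str.lower) PySem.Set.empty,
      pv_count_fold (fun wl => include_nt && PySem.Str.isIn "n't" wl)
        (input_words.map PySem.Str.lower) 0]
  have hfun : (fun (c : Int) word => if word ∈ input_words.map PySem.Str.lower then c + 1 else c)
      = (fun (c : Int) w => if decide (w ∈ input_words.map PySem.Str.lower) = true then c + 1 else c) := by
    funext c w; simp
  have hA : (pvNEGATE.foldl
        (fun c word => if word ∈ input_words.map PySem.Str.lower then c + 1 else c) (0 : Int))
      = ((pvNEGATE.filter (fun w => decide (w ∈ input_words.map PySem.Str.lower))).length : Int) := by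
    rw [hfun, pv_count_fold (fun w => decide (w ∈ input_words.map PySem.Str.lower))]
    simp
  have hset := pv_card_eq (input_words.map PySem.Str.lower)
  have hfold : (List.foldl PySem.Set.add PySem.Set.empty
        ((input_words.map PySem.Str.lower).filter (fun w => PySem.Set.contains pvNegSet w)))
      = PySem.Set.ofList ((input_words.map PySem.Str.lower).filter (fun w => PySem.Set.contains pvNegSet w)) := rfl
  cases include_nt with
  | false =>
    simp only [Bool.false_and, Bool.false_eq_true, if_false]
    rw [hA, hfold]
    simp only [List.filter_false, List.length_nil, Nat.cast_zero, add_zero, PySem.Set.len]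
    exact_mod_cast hset.symm
  | true =>
    simp only [Bool.true_and, if_true]
    rw [pv_count_fold (fun w => PySem.Str.isIn "n't" w) (input_words.map PySem.Str.lower), hA, hfold]
    simp only [PySem.Set.len]
    rw [hset]
    ring
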